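-- pv_equiv track=rewrite | github.com/Arckshire/Ferguson-Error-Report-Middle-Mile | streamlit_app.py | classify_theme_freeform
-- ===== SOURCE A (Python) =====
-- def classify_theme_freeform(msg: str) -> str:
--     """Rule-based classifier for NotExact gaps (best-effort)."""
--     if not isinstance(msg, str) or not msg.strip():
--         return ""
--     s = msg.lower()
--     if ("not in available pickup dates" in s) or ("available pickup dates" in s) or ("appointment" in s) or ("pickup window" in s) or ("delivery window" in s):
--         return "Appointment Window / Scheduling"
--     if ("phone" in s) or ("contact number" in s) or ("call" in s and "contact" in s):
--         return "Origin/Destination Phone Number Missing"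
--     if any(k in s for k in ["address", "zipcode", "zip code", "postal", "city", "state", "location invalid", "not serviceable"]):
--         return "Origin/Destination Details"
--     if any(k in s for k in ["unauthorized", "forbidden", "authentication", "authorization", "invalid api key", "token"]):
--         return "Authentication/Authorization"
--     if any(k in s for k in ["timeout", "timed out", "gateway timeout", "service unavailable", "internal server error", "bad gateway", " 500"]) or "vendor dispatch service" in s:
--         return "Technical/Server Error"
--     if any(k in s for k in ["no capacity", "capacity full", "over capacity", "not available for pickup"]):
--         return "Carrier Capacity"
--     if any(k in s for k in ["missing", "required", "invalid", "format", "cannot be blank", "must provide"]):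
--         return "Data Validation"
--     if any(k in s for k in ["not found", "does not exist", "unknown", "reference", " id ", "po ", "bol "]):
--         return "Reference/ID Issue"
--     if any(k in s for k in ["weight", "dimension", "length", "width", "height", "nmfc", "class "]):
--         return "Freight Details"
--     if any(k in s for k in ["duplicate", "already exists", "already scheduled"]):
--         return "Duplicate / Already Scheduled"
--     if any(k in s for k in ["not in service area", "lane not serviced", "no service in"]):
--         return "Coverage / Service Area"
--     return "Other / Needs Review"
-- ===== SOURCE B (Python) =====
-- GROUPS = [
--     (["not in available pickup dates", "available pickup dates", "appointment", "pickup window", "delivery window"],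
--      "Appointment Window / Scheduling"),
--     (["phone", "contact number"],
--      "Origin/Destination Phone Number Missing"),
--     (["address", "zipcode", "zip code", "postal", "city", "state", "location invalid", "not serviceable"],
--      "Origin/Destination Details"),
--     (["unauthorized", "forbidden", "authentication", "authorization", "invalid api key", "token"],
--      "Authentication/Authorization"),
--     (["timeout", "timed out", "gateway timeout", "service unavailable", "internal server error", "bad gateway", " 500", "vendor dispatch service"],
--      "Technical/Server Error"),
--     (["no capacity", "capacity full", "over capacity", "not available for pickup"],
--      "Carrier Capacity"),
--     (["missing", "required", "invalid", "format", "cannot be blank", "must provide"],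
--      "Data Validation"),
--     (["not found", "does not exist", "unknown", "reference", " id ", "po ", "bol "],
--      "Reference/ID Issue"),
--     (["weight", "dimension", "length", "width", "height", "nmfc", "class "],
--      "Freight Details"),
--     (["duplicate", "already exists", "already scheduled"],
--      "Duplicate / Already Scheduled"),
--     (["not in service area", "lane not serviced", "no service in"],
--      "Coverage / Service Area"),
-- ]
--
-- # Flat keyword index: each keyword carries the priority (index) of its theme.
-- KEYWORDS = [(kw, i) for i, (kws, _) in enumerate(GROUPS) for kw in kws]
-- LABELS = [lab for _, lab in GROUPS]
--
-- def classify_theme_freeform(msg: str) -> str: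
--     """Rule-based classifier for NotExact gaps (best-effort).
--
--     Single pass over a flat keyword->priority index computing the minimum
--     matching priority (first-match-in-order == argmin of rule index), plus
--     the one compound phone rule; the label is looked up by that index.
--     """
--     if not isinstance(msg, str) or not msg.strip():
--         return ""
--     s = msg.lower()
--     best = len(GROUPS)
--     for kw, pri in KEYWORDS:
--         if kw in s:
--             best = min(best, pri)
--     if "call" in s and "contact" in s:
--         best = min(best, 1)
--     return LABELS[best] if best < len(GROUPS) else "Other / Needs Review"
-- ===== Notes on version B (the rewrite author's own statement) =====
-- stated objective: alternative
-- what changed: Replaced the early-return chain of eleven if-statements by a flat keyword->priority index scanned in one pass computing the minimum matching rule index (argmin), with the compound phone rule folded in afterwards and the label looked up in a table by that index.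
import Mathlib
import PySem

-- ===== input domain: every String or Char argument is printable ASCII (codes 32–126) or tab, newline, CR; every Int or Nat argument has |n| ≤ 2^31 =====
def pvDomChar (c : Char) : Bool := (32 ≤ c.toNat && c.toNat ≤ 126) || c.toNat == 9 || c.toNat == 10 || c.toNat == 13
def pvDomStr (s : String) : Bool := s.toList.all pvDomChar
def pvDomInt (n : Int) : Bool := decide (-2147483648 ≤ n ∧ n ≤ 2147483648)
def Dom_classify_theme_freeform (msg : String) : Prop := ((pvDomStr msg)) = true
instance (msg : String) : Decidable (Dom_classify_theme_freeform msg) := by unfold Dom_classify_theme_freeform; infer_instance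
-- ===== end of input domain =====

-- B replaces A's early-return if-chain by one pass over a flat keyword->priority index computing the minimum matching rule index (objective: alternative).
-- ===== PORT A =====
-- Transliteration of A: guard, lower, then the chain of ifs with 'in' = PySem.Str.isIn.
def classify_theme_freeform (msg : String) : String :=
  if PySem.Str.strip msg = "" then "" else
  let s := PySem.Str.lower msg
  if PySem.Str.isIn "not in available pickup dates" s || PySem.Str.isIn "available pickup dates" s || PySem.Str.isIn "appointment" s || PySem.Str.isIn "pickup window" s || PySem.Str.isIn "delivery window" s then
    "Appointment Window / Scheduling"
  else if PySem.Str.isIn "phone" s || PySem.Str.isIn "contact number" s || (PySem.Str.isIn "call" s && PySem.Str.isIn "contact" s) then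
    "Origin/Destination Phone Number Missing"
  else if ["address", "zipcode", "zip code", "postal", "city", "state", "location invalid", "not serviceable"].any (fun k => PySem.Str.isIn k s) then
    "Origin/Destination Details"
  else if ["unauthorized", "forbidden", "authentication", "authorization", "invalid api key", "token"].any (fun k => PySem.Str.isIn k s) then
    "Authentication/Authorization"
  else if ["timeout", "timed out", "gateway timeout", "service unavailable", "internal server error", "bad gateway", " 500"].any (fun k => PySem.Str.isIn k s) || PySem.Str.isIn "vendor dispatch service" s then
    "Technical/Server Error"
  else if ["no capacity", "capacity full", "over capacity", "not available for pickup"].any (fun k => PySem.Str.isIn k s) then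
    "Carrier Capacity"
  else if ["missing", "required", "invalid", "format", "cannot be blank", "must provide"].any (fun k => PySem.Str.isIn k s) then
    "Data Validation"
  else if ["not found", "does not exist", "unknown", "reference", " id ", "po ", "bol "].any (fun k => PySem.Str.isIn k s) then
    "Reference/ID Issue"
  else if ["weight", "dimension", "length", "width", "height", "nmfc", "class "].any (fun k => PySem.Str.isIn k s) then
    "Freight Details"
  else if ["duplicate", "already exists", "already scheduled"].any (fun k => PySem.Str.isIn k s) then
    "Duplicate / Already Scheduled"
  else if ["not in service area", "lane not serviced", "no service in"].any (fun k => PySem.Str.isIn k s) then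
    "Coverage / Service Area"
  else
    "Other / Needs Review"

-- ===== PORT B =====
-- The themes with their keyword lists, in priority order (Source B's GROUPS).
def pvGroups : List (List String × String) :=
  [ (["not in available pickup dates", "available pickup dates", "appointment", "pickup window", "delivery window"], "Appointment Window / Scheduling"),
    (["phone", "contact number"], "Origin/Destination Phone Number Missing"),
    (["address", "zipcode", "zip code", "postal", "city", "state", "location invalid", "not serviceable"], "Origin/Destination Details"),
    (["unauthorized", "forbidden", "authentication", "authorization", "invalid api key", "token"], "Authentication/Authorization"),
    (["timeout", "timed out", "gateway timeout", "service unavailable", "internal server error", "bad gateway", " 500", "vendor dispatch service"], "Technical/Server Error"),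
    (["no capacity", "capacity full", "over capacity", "not available for pickup"], "Carrier Capacity"),
    (["missing", "required", "invalid", "format", "cannot be blank", "must provide"], "Data Validation"),
    (["not found", "does not exist", "unknown", "reference", " id ", "po ", "bol "], "Reference/ID Issue"),
    (["weight", "dimension", "length", "width", "height", "nmfc", "class "], "Freight Details"),
    (["duplicate", "already exists", "already scheduled"], "Duplicate / Already Scheduled"),
    (["not in service area", "lane not serviced", "no service in"], "Coverage / Service Area") ]

-- Flat keyword index (Source B's KEYWORDS comprehension): each keyword with its theme's priority.
def pvKeywords : List (String × Nat) :=
  pvGroups.zipIdx.flatMap (fun gi => gi.1.1.map (fun kw => (kw, gi.2)))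

def pvLabels : List String := pvGroups.map Prod.snd

def classify_theme_freeform_alt (msg : String) : String :=
  if PySem.Str.strip msg = "" then "" else
  let s := PySem.Str.lower msg
  let best := pvKeywords.foldl (fun acc kp => if PySem.Str.isIn kp.1 s then min acc kp.2 else acc) pvGroups.length
  let best := if PySem.Str.isIn "call" s && PySem.Str.isIn "contact" s then min best 1 else best
  if best < pvGroups.length then pvLabels.getD best "Other / Needs Review" else "Other / Needs Review"

-- ===== PRECONDITION & SPEC =====
def Spec_classify_theme_freeform (msg : String) (out : String) : Prop := out = classify_theme_freeform_alt msg
instance (msg : String) (out : String) : Decidable (Spec_classify_theme_freeform msg out) := by unfold Spec_classify_theme_freeform; infer_instance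

-- ===== CLAIM =====
def Claim_equal_classify_theme_freeform : Prop := ∀ (msg : String), Dom_classify_theme_freeform msg → Spec_classify_theme_freeform msg (classify_theme_freeform msg)

-- ===== LEMMAS AND PROOFS =====

-- proof-side view of the flat index: the groups' keyword lists tagged with increasing priorities
def pvFlat : Nat → List (List String) → List (String × Nat)
  | _, [] => []
  | i, g :: gs => g.map (fun k => (k, i)) ++ pvFlat (i + 1) gs

lemma pvKeywords_eq : pvKeywords = pvFlat 0 (pvGroups.map Prod.fst) := by decide

-- the minimum matching priority, group by group (11 = no match)
def pvBest (s : String) : Nat → List (List String) → Nat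
  | _, [] => 11
  | i, g :: gs => if g.any (fun k => PySem.Str.isIn k s) then min i (pvBest s (i + 1) gs) else pvBest s (i + 1) gs

lemma pvFold_group (s : String) (g : List String) (i acc : Nat) :
    (g.map (fun k => (k, i))).foldl (fun acc kp => if PySem.Str.isIn kp.1 s then min acc kp.2 else acc) acc
      = if g.any (fun k => PySem.Str.isIn k s) then min acc i else acc := by
  induction g generalizing acc with
  | nil => simp
  | cons k g ih =>
    simp only [List.map_cons, List.foldl_cons, List.any_cons]
    by_cases h : PySem.Str.isIn k s = true
    · rw [if_pos h, ih]
      simp only [h, Bool.true_or, if_pos]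
      split_ifs <;> omega
    · rw [if_neg h, ih]
      simp only [Bool.not_eq_true] at h
      simp only [h, Bool.false_or]

lemma pvFold_flat (s : String) (gs : List (List String)) (i acc : Nat) (h : acc ≤ 11) :
    (pvFlat i gs).foldl (fun acc kp => if PySem.Str.isIn kp.1 s then min acc kp.2 else acc) acc
      = min acc (pvBest s i gs) := by
  induction gs generalizing i acc with
  | nil => simp [pvFlat, pvBest, Nat.min_eq_left h]
  | cons g gs ih =>
    simp only [pvFlat, pvBest, List.foldl_append, pvFold_group]
    by_cases hg : g.any (fun k => PySem.Str.isIn k s)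
    · rw [if_pos hg, if_pos hg, ih _ _ (le_trans (Nat.min_le_left _ _) h)]
      omega
    · rw [if_neg hg, if_neg hg, ih _ _ h]

lemma pvBest_ge (s : String) (gs : List (List String)) (i : Nat) (h : i + gs.length ≤ 11) :
    i ≤ pvBest s i gs := by
  induction gs generalizing i with
  | nil => simp [pvBest]; omega
  | cons g gs ih =>
    simp only [pvBest]
    have := ih (i + 1) (by simp at h ⊢; omega)
    split_ifs <;> omega

lemma pvBest_le (s : String) (gs : List (List String)) (i : Nat) : pvBest s i gs ≤ 11 := by
  induction gs generalizing i with
  | nil => simp [pvBest]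
  | cons g gs ih =>
    simp only [pvBest]
    have := ih (i + 1)
    split_ifs <;> omega

-- the generic first-match chain over (keywords, label) groups
def pvChain (s : String) : List (List String × String) → String
  | [] => "Other / Needs Review"
  | (g, lab) :: rest => if g.any (fun k => PySem.Str.isIn k s) then lab else pvChain s rest

lemma pvChain_spec (s : String) (gs : List (List String × String)) (i : Nat) (h : i + gs.length ≤ 11) :
    pvChain s gs = if pvBest s i (gs.map Prod.fst) < 11 then
        (gs.map Prod.snd).getD (pvBest s i (gs.map Prod.fst) - i) "Other / Needs Review"
      else "Other / Needs Review" := by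
  induction gs generalizing i with
  | nil => simp [pvChain, pvBest]
  | cons p rest ih =>
    obtain ⟨g, lab⟩ := p
    simp only [pvChain, pvBest, List.map_cons]
    have hge := pvBest_ge s (rest.map Prod.fst) (i + 1) (by simp at h ⊢; omega)
    by_cases hg : (g.any fun k => PySem.Str.isIn k s) = true
    · simp only [hg, if_true]
      have hmin : min i (pvBest s (i + 1) (rest.map Prod.fst)) = i := by omega
      rw [hmin, if_pos (by simp at h; omega : i < 11)]
      simp
    · simp only [Bool.not_eq_true] at hg
      simp only [hg, Bool.false_eq_true, if_false]
      rw [ih (i + 1) (by simp at h ⊢; omega)]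
      by_cases hlt : pvBest s (i + 1) (rest.map Prod.fst) < 11
      · rw [if_pos hlt, if_pos hlt]
        have hsub : pvBest s (i + 1) (rest.map Prod.fst) - i
            = (pvBest s (i + 1) (rest.map Prod.fst) - (i + 1)) + 1 := by omega
        rw [hsub]
        simp [List.getD]
      · rw [if_neg hlt, if_neg hlt]

lemma pvCompMin (s : String) (gs : List (List String)) (h : 1 + gs.length ≤ 11) :
    min (min 11 (pvBest s 1 gs)) 1 = 1 := by
  have := pvBest_ge s gs 1 h
  omega

-- ===== VERDICT =====
theorem classify_theme_freeform_spec : Claim_equal_classify_theme_freeform := by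
  intro msg _
  unfold Spec_classify_theme_freeform classify_theme_freeform classify_theme_freeform_alt
  by_cases hstrip : PySem.Str.strip msg = ""
  · simp [hstrip]
  · simp only [if_neg hstrip, pvKeywords_eq]
    rw [pvFold_flat _ _ _ _ (by decide)]
    rw [show pvGroups.length = 11 from rfl]
    generalize PySem.Str.lower msg = s
    have e0 : (PySem.Str.isIn "not in available pickup dates" s || PySem.Str.isIn "available pickup dates" s || PySem.Str.isIn "appointment" s || PySem.Str.isIn "pickup window" s || PySem.Str.isIn "delivery window" s)
        = (["not in available pickup dates", "available pickup dates", "appointment", "pickup window", "delivery window"].any fun k => PySem.Str.isIn k s) := by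
      simp [Bool.or_assoc]
    have e4 : ((["timeout", "timed out", "gateway timeout", "service unavailable", "internal server error", "bad gateway", " 500"].any fun k => PySem.Str.isIn k s) || PySem.Str.isIn "vendor dispatch service" s)
        = (["timeout", "timed out", "gateway timeout", "service unavailable", "internal server error", "bad gateway", " 500", "vendor dispatch service"].any fun k => PySem.Str.isIn k s) := by
      simp [Bool.or_assoc]
    rw [e0, e4]
    by_cases hc : (PySem.Str.isIn "call" s && PySem.Str.isIn "contact" s) = true
    · simp only [hc, Bool.or_true, if_true]
      simp only [pvGroups, List.map_cons, List.map_nil]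
      by_cases h0 : (["not in available pickup dates", "available pickup dates", "appointment", "pickup window", "delivery window"].any fun k => PySem.Str.isIn k s) = true
      · rw [if_pos h0, pvBest, if_pos h0, Nat.zero_min, Nat.min_zero]
        decide
      · rw [if_neg h0, pvBest, if_neg h0]
        rw [pvCompMin _ _ (by decide)]
        decide
    · simp only [Bool.not_eq_true] at hc
      simp only [hc, Bool.or_false, Bool.false_eq_true, if_false]
      have hle := pvBest_le s (pvGroups.map Prod.fst) 0
      rw [Nat.min_eq_right hle]
      have hch := pvChain_spec s pvGroups 0 (by decide)
      rw [Nat.sub_zero] at hch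
      have hlab : pvLabels = pvGroups.map Prod.snd := rfl
      rw [hlab, ← hch]
      simp only [pvChain, pvGroups, List.any_cons, List.any_nil, Bool.or_false]
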